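-- pv_equiv track=rewrite | github.com/sshsurabhi/Machine-Learning | test.py | getSuffixScore
-- ===== SOURCE A (Python) =====
-- def getSuffixScore(text, suffixString):
--     matchedString = ''
--     for i in range(len(suffixString)):
--         subString = suffixString[:(i+1)]
--         if(subString in text):
--             matchedString = subString
--             continue
--         break
--     return matchedString, len(matchedString)
-- ===== SOURCE B (Python) =====
-- def getSuffixScore(text, suffixString):
--     # Binary search over prefix length: membership of suffixString[:k] in text
--     # is monotone in k (a prefix of a substring of text is a substring of text).
--     lo, hi = 0, len(suffixString)
--     while lo < hi:
--         mid = (lo + hi + 1) // 2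
--         if suffixString[:mid] in text:
--             lo = mid
--         else:
--             hi = mid - 1
--     return suffixString[:lo], lo
-- ===== Notes on version B (the rewrite author's own statement) =====
-- stated objective: faster
-- what changed: Replaced the linear scan over every prefix length (each doing a substring search) by a binary search over the prefix length, which is valid because membership of suffixString[:k] in text is monotone in k.
import Mathlib
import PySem

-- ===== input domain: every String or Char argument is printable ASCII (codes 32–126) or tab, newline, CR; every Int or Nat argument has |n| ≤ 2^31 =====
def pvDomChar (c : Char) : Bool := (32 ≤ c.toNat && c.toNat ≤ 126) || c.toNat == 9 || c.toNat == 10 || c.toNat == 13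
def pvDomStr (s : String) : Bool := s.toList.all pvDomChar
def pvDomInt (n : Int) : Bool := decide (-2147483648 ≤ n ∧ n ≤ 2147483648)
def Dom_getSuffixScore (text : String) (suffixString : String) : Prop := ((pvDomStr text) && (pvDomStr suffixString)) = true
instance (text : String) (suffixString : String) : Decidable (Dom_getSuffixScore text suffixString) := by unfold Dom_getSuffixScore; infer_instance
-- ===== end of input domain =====

-- B replaces A's linear scan over prefix lengths by a binary search over the
-- prefix length (membership of a prefix in text is monotone in its length);
-- objective: faster (asymptotic).

-- ===== PORT A =====
-- A's loop: for i in range(len(suffixString)): sub = suffixString[:i+1];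
-- if sub in text: matched = sub; continue; break
def pvLoopA (tl l : List Char) (i : Nat) (matched : List Char) : List Char :=
  if i < l.length then
    let sub := l.take (i + 1)                  -- suffixString[:(i+1)]
    if PySem.Chars.isIn sub tl then            -- subString in text
      pvLoopA tl l (i + 1) sub
    else matched
  else matched
termination_by l.length - i

def getSuffixScore (text : String) (suffixString : String) : String × Int :=
  let matchedString := pvLoopA text.toList suffixString.toList 0 []
  (String.ofList matchedString, (matchedString.length : Int))

-- ===== PORT B =====
-- lo/hi are Python ints that stay ≥ 0 throughout; (lo+hi+1)//2 on nonnegative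
-- ints is exactly Nat division, so the port uses Nat — exact on this loop.
def pvLoopB (tl l : List Char) (lo hi : Nat) : Nat :=
  if lo < hi then
    let mid := (lo + hi + 1) / 2
    if PySem.Chars.isIn (l.take mid) tl then   -- suffixString[:mid] in text
      pvLoopB tl l mid hi
    else
      pvLoopB tl l lo (mid - 1)
  else lo
termination_by hi - lo
decreasing_by all_goals omega

def getSuffixScore_alt (text : String) (suffixString : String) : String × Int :=
  let lo := pvLoopB text.toList suffixString.toList 0 suffixString.toList.length
  (String.ofList (suffixString.toList.take lo), (lo : Int))

-- ===== PRECONDITION & SPEC =====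
def Spec_getSuffixScore (text : String) (suffixString : String) (out : String × Int) : Prop := out = getSuffixScore_alt text suffixString
instance (text : String) (suffixString : String) (out : String × Int) : Decidable (Spec_getSuffixScore text suffixString out) := by unfold Spec_getSuffixScore; infer_instance

-- ===== CLAIM (what is proved, stated in full; the proofs are below) =====
def Claim_equal_getSuffixScore : Prop := ∀ (text : String) (suffixString : String), Dom_getSuffixScore text suffixString → Spec_getSuffixScore text suffixString (getSuffixScore text suffixString)

-- ===== LEMMAS AND PROOFS =====

-- P tl l k: suffixString[:k] occurs in text
def pvP (tl l : List Char) (k : Nat) : Prop := PySem.Chars.isIn (l.take k) tl = true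

theorem pvP_mono (tl l : List Char) {j k : Nat} (hjk : j ≤ k) (hk : pvP tl l k) :
    pvP tl l j := by
  unfold pvP at *
  rw [PySem.Chars.isIn_iff_infix] at *
  have h1 : l.take j <+: l.take k := by
    rw [show l.take j = (l.take k).take j by rw [List.take_take, Nat.min_eq_left hjk]]
    exact List.take_prefix _ _
  exact h1.isInfix.trans hk

theorem pvP_zero (tl l : List Char) : pvP tl l 0 := by
  simp [pvP, PySem.Chars.isIn_nil]

theorem pvLoopA_eq (tl l : List Char) (k : Nat) (hkL : k ≤ l.length)
    (hPk : pvP tl l k) (hstop : k = l.length ∨ ¬ pvP tl l (k + 1)) :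
    ∀ i, i ≤ k → pvLoopA tl l i (l.take i) = l.take k := by
  intro i hik
  induction hn : k - i generalizing i with
  | zero =>
    have : i = k := by omega
    subst this
    rw [pvLoopA]
    rcases hstop with h | h
    · simp [h]
    · rcases Nat.lt_or_ge i l.length with hlt | hge
      · simp only [hlt, if_true]
        have : ¬ PySem.Chars.isIn (l.take (i + 1)) tl = true := h
        simp [this]
      · simp [Nat.not_lt.mpr hge]
  | succ n ih =>
    have hik' : i < k := by omega
    have hiL : i < l.length := by omega
    have hPi1 : pvP tl l (i + 1) := pvP_mono tl l (by omega) hPk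
    rw [pvLoopA]
    simp only [hiL, if_true]
    have : PySem.Chars.isIn (l.take (i + 1)) tl = true := hPi1
    simp only [this, if_true]
    exact ih (i + 1) (by omega) (by omega)

theorem pvLoopB_spec (tl l : List Char) :
    ∀ n lo hi, hi - lo ≤ n → lo ≤ hi → hi ≤ l.length → pvP tl l lo →
    (hi = l.length ∨ ¬ pvP tl l (hi + 1)) →
    pvP tl l (pvLoopB tl l lo hi) ∧ pvLoopB tl l lo hi ≤ l.length ∧
      (pvLoopB tl l lo hi = l.length ∨ ¬ pvP tl l (pvLoopB tl l lo hi + 1)) := by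
  intro n
  induction n with
  | zero =>
    intro lo hi hfuel hle hhiL hPlo hstop
    have : lo = hi := by omega
    subst this
    rw [pvLoopB]
    simp only [Nat.lt_irrefl, if_false]
    exact ⟨hPlo, hhiL, hstop⟩
  | succ n ih =>
    intro lo hi hfuel hle hhiL hPlo hstop
    rw [pvLoopB]
    by_cases hlt : lo < hi
    · simp only [hlt, if_true]
      by_cases hmid : PySem.Chars.isIn (l.take ((lo + hi + 1) / 2)) tl = true
      · simp only [hmid, if_true]
        exact ih ((lo + hi + 1) / 2) hi (by omega) (by omega) hhiL hmid hstop
      · simp only [hmid]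
        refine ih lo ((lo + hi + 1) / 2 - 1) (by omega) (by omega) (by omega) hPlo ?_
        right
        have : (lo + hi + 1) / 2 - 1 + 1 = (lo + hi + 1) / 2 := by omega
        rw [this]
        exact hmid
    · simp only [hlt, if_false]
      have : lo = hi := by omega
      subst this
      exact ⟨hPlo, hhiL, hstop⟩

-- ===== VERDICT (by name: the statement is the Claim_ definition above) =====
theorem getSuffixScore_spec : Claim_equal_getSuffixScore := by
  intro text suffixString _
  unfold Spec_getSuffixScore getSuffixScore getSuffixScore_alt
  set tl := text.toList
  set l := suffixString.toList
  obtain ⟨hP, hle, hstop⟩ :=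
    pvLoopB_spec tl l l.length 0 l.length (by omega) (by omega) le_rfl
      (pvP_zero tl l) (Or.inl rfl)
  have hA : pvLoopA tl l 0 (l.take 0) = l.take (pvLoopB tl l 0 l.length) :=
    pvLoopA_eq tl l _ hle hP hstop 0 (Nat.zero_le _)
  simp only [List.take_zero] at hA
  simp only [hA, List.length_take, Nat.min_eq_left hle]
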